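-- pv_equiv track=rewrite | github.com/mic0ud/Leetcode-py3 | src/992.subarrays-with-k-different-integers.py | helper
-- ===== SOURCE A (Python) =====
-- from collections import deque, defaultdict, Counter
--
-- def helper(s: str) -> int:
--     idx = defaultdict(deque) # indices of keys
--     res, i, n, keys = 0, 0, len(s), set(s)
--     for j,c in enumerate(s):
--         idx[c].append(j)
--         if all([idx[k] for k in keys]):
--             # from left
--             res += min([idx[k][-1] for k in keys])-i
--             # to right
--             res += n-j
--             idx[s[i]].popleft()
--             i += 1
--     return res
-- ===== SOURCE B (Python) =====
-- def helper(s: str) -> int: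
--     # For each right end j, every left end l with l <= min(last occurrence of
--     # each distinct char) gives a substring s[l..j] containing all distinct
--     # chars of s; so add min(last.values()) + 1 once all chars were seen.
--     K = len(set(s))
--     last = {}
--     res = 0
--     for j, c in enumerate(s):
--         last[c] = j
--         if len(last) == K:
--             res += min(last.values()) + 1
--     return res
-- ===== Notes on version B (the rewrite author's own statement) =====
-- stated objective: faster
-- what changed: A keeps per-char deques of all indices plus a moving left pointer and mixes left/right offset counting; B keeps only the last occurrence of each char and adds min(last.values())+1 valid left endpoints per right endpoint in one pass.
import Mathlib
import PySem

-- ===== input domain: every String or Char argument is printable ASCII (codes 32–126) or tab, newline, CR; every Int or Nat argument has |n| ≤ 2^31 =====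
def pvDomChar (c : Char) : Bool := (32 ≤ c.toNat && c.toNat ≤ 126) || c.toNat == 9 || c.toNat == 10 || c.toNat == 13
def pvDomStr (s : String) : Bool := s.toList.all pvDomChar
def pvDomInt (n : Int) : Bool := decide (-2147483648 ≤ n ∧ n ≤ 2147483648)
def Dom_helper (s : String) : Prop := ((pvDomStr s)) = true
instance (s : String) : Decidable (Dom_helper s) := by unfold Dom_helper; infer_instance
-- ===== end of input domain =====

-- B replaces A's per-char index deques and moving left pointer by a single last-occurrence
-- dict, adding min(last.values())+1 valid left endpoints per right endpoint (objective: faster,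
-- constant factor).

-- ===== PORT A =====
-- one iteration of A's loop body; state = (idx, res, i), element = (j, c)
def helperStep (s : String) (keys : List Char) (n : Int)
    (st : PySem.Dict Char (List Int) × Int × Int) (jc : Int × Char) :
    PySem.Dict Char (List Int) × Int × Int :=
  let idx := st.1.insert jc.2 (st.1.getD jc.2 [] ++ [jc.1])        -- idx[c].append(j)
  if keys.all (fun k => !(idx.getD k []).isEmpty) then             -- all([idx[k] for k in keys])
    -- min([idx[k][-1] for k in keys]); every deque is nonempty in this branch and keys ≠ []
    -- whenever the loop runs, so the .getD defaults are never used (Python would raise there)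
    let m := (PySem.List.min? (keys.map (fun k => (idx.getD k []).getLast?.getD 0))
                (fun x => x)).getD 0
    let res := st.2.1 + (m - st.2.2) + (n - jc.1)                  -- res += min(..)-i; res += n-j
    -- idx[s[i]].popleft(); 0 ≤ i ≤ j < n here, so s[i] is in range (Python would raise IndexError)
    let ci := (PySem.Str.pyGet? s st.2.2).getD ' '
    (idx.insert ci ((idx.getD ci []).drop 1), res, st.2.2 + 1)     -- popleft; i += 1
  else (idx, st.2.1, st.2.2)

def helper (s : String) : Int :=
  ((PySem.List.enumerate s.toList 0).foldl
      (helperStep s (PySem.Set.ofList s.toList) (PySem.Str.len s))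
      (PySem.Dict.empty, 0, 0)).2.1

-- ===== PORT B =====
-- one iteration of B's loop body; state = (last, res), element = (j, c)
def altStep (K : Int) (st : PySem.Dict Char Int × Int) (jc : Int × Char) :
    PySem.Dict Char Int × Int :=
  let last := st.1.insert jc.2 jc.1                                -- last[c] = j
  if (PySem.Dict.size last : Int) = K then
    -- min(last.values()); nonempty in this branch (Python would raise on an empty dict)
    (last, st.2 + (PySem.List.min? last.values (fun x => x)).getD 0 + 1)
  else (last, st.2)

def helper_alt (s : String) : Int :=
  ((PySem.List.enumerate s.toList 0).foldl
      (altStep ((PySem.Set.ofList s.toList).length : Int))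
      (PySem.Dict.empty, 0)).2

-- ===== PRECONDITION & SPEC =====
def Spec_helper (s : String) (out : Int) : Prop := out = helper_alt s
instance (s : String) (out : Int) : Decidable (Spec_helper s out) := by unfold Spec_helper; infer_instance

-- ===== CLAIM (what is proved, stated in full; the proofs are below) =====
def Claim_equal_helper : Prop := ∀ (s : String), Dom_helper s → Spec_helper s (helper s)


-- ===== LEMMAS AND PROOFS =====

-- `occsIdx p c j` = indices (offset by j) of the occurrences of c in p, as Python ints
def occsIdx (p : List Char) (c : Char) (j : Nat) : List Int :=
  match p, j with
  | [], _ => []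
  | x :: xs, j => (if x = c then [(j : Int)] else []) ++ occsIdx xs c (j + 1)

-- all occurrence indices of c in p
def occs (p : List Char) (c : Char) : List Int := occsIdx p c 0

-- occurrence indices of c in p that are >= i
def occsFrom (i : Nat) (p : List Char) (c : Char) : List Int := occsIdx (p.drop i) c i

-- the coupling invariant between A's loop state and B's loop state after processing prefix p of L
def CInv (L p : List Char) (A : PySem.Dict Char (List Int) × Int × Int)
    (B : PySem.Dict Char Int × Int) : Prop :=
  ∃ i : Nat,
    A.2.2 = (i : Int) ∧ i ≤ p.length ∧
    (∀ c, A.1.getD c [] = occsFrom i p c) ∧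
    (∀ c, B.1.get? c = (occs p c).getLast?) ∧
    B.1.keys = PySem.Set.ofList p ∧
    A.2.1 = B.2 + (i : Int) * ((L.length : Int) - (p.length : Int)) ∧
    (1 ≤ i → ∀ k ∈ PySem.Set.ofList L, occsFrom (i - 1) p k ≠ [])

lemma occsIdx_append (p q : List Char) (c : Char) (j : Nat) :
    occsIdx (p ++ q) c j = occsIdx p c j ++ occsIdx q c (j + p.length) := by
  induction p generalizing j with
  | nil => simp [occsIdx]
  | cons x xs ih => simp [occsIdx, ih, Nat.add_assoc, Nat.add_comm 1 xs.length]

lemma mem_occsIdx {p : List Char} {c : Char} {j : Nat} {x : Int} (h : x ∈ occsIdx p c j) :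
    (j : Int) ≤ x := by
  induction p generalizing j with
  | nil => simp [occsIdx] at h
  | cons y ys ih =>
    simp only [occsIdx, List.mem_append] at h
    rcases h with h | h
    · split at h <;> simp_all
    · have := ih h; omega

lemma occsIdx_ne_nil_iff (p : List Char) (c : Char) (j : Nat) :
    occsIdx p c j ≠ [] ↔ c ∈ p := by
  induction p generalizing j with
  | nil => simp [occsIdx]
  | cons y ys ih =>
    by_cases hy : y = c
    · subst hy; simp [occsIdx]
    · simp [occsIdx, hy, ih, Ne.symm hy]

lemma occsFrom_zero (p : List Char) (c : Char) : occsFrom 0 p c = occs p c := rfl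

lemma occsFrom_lt_of_ne_nil {i : Nat} {p : List Char} {c : Char} (h : occsFrom i p c ≠ []) :
    i < p.length := by
  by_contra hge
  exact h (by unfold occsFrom; rw [List.drop_eq_nil_of_le (by omega)]; rfl)

lemma occsFrom_append {i : Nat} (p : List Char) (c' c : Char) (hi : i ≤ p.length) :
    occsFrom i (p ++ [c']) c
      = occsFrom i p c ++ (if c' = c then [(p.length : Int)] else []) := by
  unfold occsFrom
  rw [List.drop_append_of_le_length hi, occsIdx_append]
  have h2 : i + (p.drop i).length = p.length := by simp; omega
  rw [h2]
  simp [occsIdx]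

lemma occsFrom_cons {i : Nat} {p : List Char} (c : Char) (hi : i < p.length) :
    occsFrom i p c = (if p[i] = c then [(i : Int)] else []) ++ occsFrom (i + 1) p c := by
  unfold occsFrom
  rw [List.drop_eq_getElem_cons hi]
  rfl

lemma occs_eq_append_occsFrom {i : Nat} {p : List Char} {c : Char} (h : occsFrom i p c ≠ []) :
    ∃ pre, occs p c = pre ++ occsFrom i p c := by
  induction i with
  | zero => exact ⟨[], rfl⟩
  | succ i ih =>
    have hlt : i < p.length := by have := occsFrom_lt_of_ne_nil h; omega
    have hsplit := occsFrom_cons c hlt (p := p)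
    have hne : occsFrom i p c ≠ [] := by
      rw [hsplit]; intro hnil
      rcases List.append_eq_nil_iff.1 hnil with ⟨-, h2⟩
      exact h h2
    obtain ⟨pre, hpre⟩ := ih hne
    exact ⟨pre ++ (if p[i] = c then [(i : Int)] else []),
      by rw [hpre, hsplit, List.append_assoc]⟩

lemma getLast?_occsFrom {i : Nat} {p : List Char} {c : Char} (h : occsFrom i p c ≠ []) :
    (occs p c).getLast? = (occsFrom i p c).getLast? := by
  obtain ⟨pre, hpre⟩ := occs_eq_append_occsFrom h
  rw [hpre]; exact List.getLast?_append_of_ne_nil pre h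

lemma occs_ne_nil_of_occsFrom {i : Nat} {p : List Char} {c : Char} (h : occsFrom i p c ≠ []) :
    occs p c ≠ [] := by
  obtain ⟨pre, hpre⟩ := occs_eq_append_occsFrom h
  rw [hpre]; simp [h]

lemma mem_of_occsFrom_ne_nil {i : Nat} {p : List Char} {c : Char} (h : occsFrom i p c ≠ []) :
    c ∈ p := (occsIdx_ne_nil_iff p c 0).1 (occs_ne_nil_of_occsFrom h)

lemma min?_id_perm {l l' : List Int} (h : l.Perm l') :
    PySem.List.min? l (fun x => x) = PySem.List.min? l' (fun x => x) := by
  cases hl : PySem.List.min? l (fun x => x) with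
  | none =>
    have hnil : l = [] := (PySem.List.min?_eq_none_iff l _).1 hl
    have hnil' : l' = [] := by
      rw [← List.length_eq_zero_iff, ← h.length_eq, hnil]; rfl
    exact ((PySem.List.min?_eq_none_iff l' _).2 hnil').symm
  | some a =>
    cases hl' : PySem.List.min? l' (fun x => x) with
    | none =>
      have hnil' : l' = [] := (PySem.List.min?_eq_none_iff l' _).1 hl'
      have hnil : l = [] := by
        rw [← List.length_eq_zero_iff, h.length_eq, hnil']; rfl
      rw [hnil, (PySem.List.min?_eq_none_iff [] _).2 rfl] at hl
      cases hl
    | some b =>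
      have ha := PySem.List.min?_mem hl
      have hb := PySem.List.min?_mem hl'
      have h1 := PySem.List.min?_isMin hl b (h.symm.subset hb)
      have h2 := PySem.List.min?_isMin hl' a (h.subset ha)
      simp only [Option.some.injEq]
      omega

lemma min?_id_const {l : List Int} {v : Int} (hv : v ∈ l) (hall : ∀ x ∈ l, v ≤ x) :
    PySem.List.min? l (fun x => x) = some v := by
  cases hl : PySem.List.min? l (fun x => x) with
  | none =>
    rw [PySem.List.min?_eq_none_iff] at hl
    subst hl; simp at hv
  | some a =>
    have ha := PySem.List.min?_mem hl
    have h1 := PySem.List.min?_isMin hl v hv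
    have h2 := hall a ha
    simp only [Option.some.injEq]
    omega

lemma ofList_append_singleton (p : List Char) (c : Char) :
    PySem.Set.ofList (p ++ [c]) = PySem.Set.add (PySem.Set.ofList p) c := by
  simp [PySem.Set.ofList_eq_foldl, List.foldl_append]

lemma seen_iff_card (L p' : List Char) (hsub : ∀ x ∈ p', x ∈ L) :
    (PySem.Set.ofList p').length = (PySem.Set.ofList L).length ↔ (∀ k ∈ L, k ∈ p') := by
  have ndp := PySem.Set.nodup_ofList p'
  have ndL := PySem.Set.nodup_ofList L
  constructor
  · intro hlen k hk
    have hsubF : (PySem.Set.ofList p').toFinset ⊆ (PySem.Set.ofList L).toFinset := by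
      intro x hx
      simp only [List.mem_toFinset, PySem.Set.mem_ofList] at *
      exact hsub x hx
    have hcard : (PySem.Set.ofList L).toFinset.card ≤ (PySem.Set.ofList p').toFinset.card := by
      rw [List.toFinset_card_of_nodup ndp, List.toFinset_card_of_nodup ndL, hlen]
    have heq := Finset.eq_of_subset_of_card_le hsubF hcard
    have hkmem : k ∈ (PySem.Set.ofList L).toFinset := by
      simp [PySem.Set.mem_ofList, hk]
    rw [← heq] at hkmem
    simpa [PySem.Set.mem_ofList] using hkmem
  · intro hseen
    have hperm : (PySem.Set.ofList p').Perm (PySem.Set.ofList L) := by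
      rw [List.perm_ext_iff_of_nodup ndp ndL]
      intro x
      simp only [PySem.Set.mem_ofList]
      exact ⟨fun h => hsub x h, fun h => hseen x h⟩
    exact hperm.length_eq

lemma step_lemma (s : String) (p rest : List Char) (c : Char)
    (A : PySem.Dict Char (List Int) × Int × Int) (B : PySem.Dict Char Int × Int)
    (hL : s.toList = p ++ c :: rest) (h : CInv s.toList p A B) :
    CInv s.toList (p ++ [c])
      (helperStep s (PySem.Set.ofList s.toList) (PySem.Str.len s) A ((p.length : Int), c))
      (altStep ((PySem.Set.ofList s.toList).length : Int) B ((p.length : Int), c)) := by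
  obtain ⟨d, resA, iI⟩ := A
  obtain ⟨last, resB⟩ := B
  obtain ⟨i, hiI, hile, hidx, hlast, hkeys, hres, hwin⟩ := h
  simp only at hiI hile hidx hlast hkeys hres hwin
  subst hiI
  have hL' : s.toList = (p ++ [c]) ++ rest := by rw [hL]; simp
  have hsub' : ∀ x ∈ p ++ [c], x ∈ s.toList := by
    intro x hx; rw [hL']; exact List.mem_append.2 (Or.inl hx)
  have hLen : s.toList.length = p.length + 1 + rest.length := by
    rw [hL]; simp; omega
  have hlenp' : (p ++ [c]).length = p.length + 1 := by simp
  -- A's dict after the append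
  have hidx1 : ∀ k, (d.insert c (d.getD c [] ++ [(p.length : Int)])).getD k []
      = occsFrom i (p ++ [c]) k := by
    intro k
    rw [PySem.Dict.getD_insert]
    split_ifs with hk
    · subst hk; rw [hidx k, occsFrom_append p k k hile]; simp
    · rw [hidx k, occsFrom_append p c k hile]; simp [Ne.symm hk]
  -- B's dict after the update
  have happ : ∀ k, occs (p ++ [c]) k = occs p k ++ (if c = k then [(p.length : Int)] else []) := by
    intro k
    have h0 := occsFrom_append (i := 0) p c k (Nat.zero_le _)
    simpa [occsFrom_zero] using h0
  have hlast1 : ∀ k, (last.insert c (p.length : Int)).get? k = (occs (p ++ [c]) k).getLast? := by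
    intro k
    rw [PySem.Dict.get?_insert]
    split_ifs with hk
    · subst hk; rw [happ k]; simp
    · rw [happ k, hlast k]; simp [Ne.symm hk]
  have hkeys1 : (last.insert c (p.length : Int)).keys = PySem.Set.ofList (p ++ [c]) := by
    rw [ofList_append_singleton]
    by_cases hc : c ∈ PySem.Set.ofList p
    · rw [PySem.Dict.keys_insert_of_contains last _
        (by rw [PySem.Dict.contains_iff_mem_keys, hkeys]; exact hc), hkeys]
      unfold PySem.Set.add
      rw [if_pos (by simpa [PySem.Set.contains] using hc)]
    · rw [PySem.Dict.keys_insert_of_not_contains last _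
        (by rw [Bool.eq_false_iff]; rw [Ne, PySem.Dict.contains_iff_mem_keys, hkeys]; exact hc), hkeys]
      unfold PySem.Set.add
      rw [if_neg (by simpa [PySem.Set.contains] using hc)]
  have hnd1 : (last.insert c (p.length : Int)).keys.Nodup := by
    rw [hkeys1]; exact PySem.Set.nodup_ofList _
  have hsize1 : PySem.Dict.size (last.insert c (p.length : Int))
      = (PySem.Set.ofList (p ++ [c])).length := by
    have hlenk := congrArg List.length hkeys1
    simpa [PySem.Dict.keys, PySem.Dict.size] using hlenk
  have hcondB : ((PySem.Dict.size (last.insert c (p.length : Int)) : Int)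
      = ((PySem.Set.ofList s.toList).length : Int)) ↔ (∀ k ∈ s.toList, k ∈ p ++ [c]) := by
    rw [Nat.cast_inj, hsize1]
    exact seen_iff_card s.toList (p ++ [c]) hsub'
  have hcondA : ((PySem.Set.ofList s.toList).all
        (fun k => !((d.insert c (d.getD c [] ++ [(p.length : Int)])).getD k []).isEmpty) = true)
      ↔ ∀ k ∈ PySem.Set.ofList s.toList, occsFrom i (p ++ [c]) k ≠ [] := by
    simp [List.all_eq_true, hidx1]
  -- the common per-key "last occurrence" value
  have hBlist : (last.insert c (p.length : Int)).values
      = (PySem.Set.ofList (p ++ [c])).map (fun k => (occs (p ++ [c]) k).getLast?.getD 0) := by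
    rw [PySem.Dict.values_eq_map_keys _ hnd1 0, hkeys1]
    refine List.map_congr_left ?_
    intro k _
    rw [PySem.Dict.getD_eq_get?_getD, hlast1 k]
  simp only [helperStep, altStep]
  by_cases hseen : ∀ k ∈ s.toList, k ∈ p ++ [c]
  · by_cases hA : ∀ k ∈ PySem.Set.ofList s.toList, occsFrom i (p ++ [c]) k ≠ []
    · -- both conditions hold: A advances its pointer, both add using the same minimum
      rw [if_pos (hcondA.2 hA), if_pos (hcondB.2 hseen)]
      have hperm : (PySem.Set.ofList s.toList).Perm (PySem.Set.ofList (p ++ [c])) := by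
        rw [List.perm_ext_iff_of_nodup (PySem.Set.nodup_ofList _) (PySem.Set.nodup_ofList _)]
        intro x
        simp only [PySem.Set.mem_ofList]
        exact ⟨fun hx => hseen x hx, fun hx => hsub' x hx⟩
      have hAlist : (PySem.Set.ofList s.toList).map
            (fun k => ((d.insert c (d.getD c [] ++ [(p.length : Int)])).getD k []).getLast?.getD 0)
          = (PySem.Set.ofList s.toList).map (fun k => (occs (p ++ [c]) k).getLast?.getD 0) := by
        refine List.map_congr_left ?_
        intro k hk
        rw [hidx1 k, ← getLast?_occsFrom (hA k hk)]
      have hm : PySem.List.min? ((PySem.Set.ofList s.toList).map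
            (fun k => ((d.insert c (d.getD c [] ++ [(p.length : Int)])).getD k []).getLast?.getD 0))
            (fun x => x)
          = PySem.List.min? (last.insert c (p.length : Int)).values (fun x => x) := by
        rw [hAlist, hBlist]
        exact min?_id_perm (hperm.map _)
      -- the popped character is (p ++ [c])[i]
      have hiLt : i < s.toList.length := by omega
      have hiLt' : i < (p ++ [c]).length := by omega
      have hci : (PySem.Str.pyGet? s (i : Int)).getD ' ' = (p ++ [c])[i] := by
        have h1 : PySem.Str.pyGet? s (i : Int) = s.toList[i]? := by
          simp [PySem.Str.pyGet?, PySem.Chars.pyGet?, PySem.List.pyGet?_natCast]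
        rw [h1, List.getElem?_eq_getElem hiLt]
        simp only [Option.getD_some, hL']
        exact List.getElem_append_left hiLt'
      refine ⟨i + 1, ?_, ?_, ?_, hlast1, hkeys1, ?_, ?_⟩
      · simp only []; push_cast; ring
      · omega
      · -- dict after popleft
        intro k
        simp only []
        rw [hci]
        rw [PySem.Dict.getD_insert]
        split_ifs with hk
        · subst hk
          rw [hidx1 ((p ++ [c])[i]), occsFrom_cons _ hiLt']
          simp
        · rw [hidx1 k, occsFrom_cons k hiLt']
          rw [if_neg (fun heq => hk heq.symm)]
          simp
      · -- result arithmetic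
        simp only []
        rw [hm, hres, PySem.Str.len_eq]
        push_cast [hlenp']
        ring
      · -- window invariant: exactly A's condition
        intro _ k hk
        simpa using hA k hk
    · -- A's condition fails but every key was seen: the minimum is i-1, B adds i
      rw [if_neg (fun hb => hA (hcondA.1 hb)), if_pos (hcondB.2 hseen)]
      push Not at hA
      obtain ⟨k0, hk0mem, hk0⟩ := hA
      have hi1 : 1 ≤ i := by
        by_contra h0
        have hi0 : i = 0 := by omega
        subst hi0
        rw [occsFrom_zero] at hk0
        have : k0 ∈ p ++ [c] := hseen k0 (by rwa [← PySem.Set.mem_ofList s.toList])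
        exact ((occsIdx_ne_nil_iff (p ++ [c]) k0 0).2 this) hk0
      have hwin' : ∀ k ∈ PySem.Set.ofList s.toList, occsFrom (i - 1) (p ++ [c]) k ≠ [] := by
        intro k hk
        have hold := hwin hi1 k hk
        rw [occsFrom_append p c k (by omega)]
        exact fun hnil => hold (List.append_eq_nil_iff.1 hnil).1
      have hi1lt : i - 1 < (p ++ [c]).length := by omega
      have hk0cons := occsFrom_cons (p := p ++ [c]) k0 hi1lt
      have hsucc : i - 1 + 1 = i := by omega
      rw [hsucc, hk0, List.append_nil] at hk0cons
      have hk0if : occsFrom (i - 1) (p ++ [c]) k0 = [((i - 1 : Nat) : Int)] := by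
        rw [hk0cons]
        split_ifs with hpi
        · rfl
        · exact absurd (hwin' k0 hk0mem) (by rw [hk0cons, if_neg hpi]; simp)
      -- the minimum of B's values is i-1
      have hmin : PySem.List.min? (last.insert c (p.length : Int)).values (fun x => x)
          = some ((i - 1 : Nat) : Int) := by
        rw [hBlist]
        refine min?_id_const ?_ ?_
        · refine List.mem_map.2 ⟨k0, ?_, ?_⟩
          · rw [PySem.Set.mem_ofList]
            exact hseen k0 (by rwa [← PySem.Set.mem_ofList s.toList])
          · rw [getLast?_occsFrom (hwin' k0 hk0mem), hk0if]
            rfl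
        · intro x hx
          obtain ⟨k, hkmem, hkval⟩ := List.mem_map.1 hx
          have hkL : k ∈ PySem.Set.ofList s.toList := by
            rw [PySem.Set.mem_ofList]
            exact hsub' k (by rwa [← PySem.Set.mem_ofList (p ++ [c])])
          have hne := hwin' k hkL
          rw [← hkval, getLast?_occsFrom hne]
          cases hgl : (occsFrom (i - 1) (p ++ [c]) k).getLast? with
          | none => exact absurd (List.getLast?_eq_none_iff.1 hgl) hne
          | some v =>
            have hv : v ∈ occsFrom (i - 1) (p ++ [c]) k := List.mem_of_getLast? hgl
            have := mem_occsIdx hv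
            simpa using this
      refine ⟨i, rfl, by omega, hidx1, hlast1, hkeys1, ?_, fun _ => hwin'⟩
      simp only []
      rw [hmin, hres]
      simp only [Option.getD_some]
      push_cast [hlenp', Nat.cast_sub hi1]
      ring
  · -- not all keys seen yet: both sides skip, and the pointer is still 0
    have hnA : ¬ (∀ k ∈ PySem.Set.ofList s.toList, occsFrom i (p ++ [c]) k ≠ []) := by
      intro hA
      refine hseen (fun k hk => ?_)
      exact mem_of_occsFrom_ne_nil (hA k (by rwa [PySem.Set.mem_ofList]))
    rw [if_neg (fun hb => hnA (hcondA.1 hb)), if_neg (fun hb => hseen (hcondB.1 hb))]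
    have hi0 : i = 0 := by
      by_contra h0
      refine hseen (fun k hk => ?_)
      have hk' : k ∈ PySem.Set.ofList s.toList := by rwa [PySem.Set.mem_ofList]
      have hne := hwin (by omega) k hk'
      have : k ∈ p := mem_of_occsFrom_ne_nil hne
      exact List.mem_append.2 (Or.inl this)
    subst hi0
    refine ⟨0, rfl, by omega, hidx1, hlast1, hkeys1, ?_, by omega⟩
    simp only []
    simpa using hres

lemma main_fold (s : String) (rest : List Char) :
    ∀ (p : List Char) A B, s.toList = p ++ rest → CInv s.toList p A B →
      CInv s.toList s.toList
        ((PySem.List.enumerate rest (p.length : Int)).foldl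
          (helperStep s (PySem.Set.ofList s.toList) (PySem.Str.len s)) A)
        ((PySem.List.enumerate rest (p.length : Int)).foldl
          (altStep ((PySem.Set.ofList s.toList).length : Int)) B) := by
  induction rest with
  | nil =>
    intro p A B hL h
    simp only [PySem.List.enumerate_nil, List.foldl_nil]
    rw [List.append_nil] at hL
    exact hL ▸ h
  | cons c rest ih =>
    intro p A B hL h
    rw [PySem.List.enumerate_cons]
    simp only [List.foldl_cons]
    have hstep := step_lemma s p rest c A B hL h
    have hlen : ((p ++ [c]).length : Int) = (p.length : Int) + 1 := by
      simp [List.length_append]; try omega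
    have hrec := ih (p ++ [c]) _ _ (by rw [hL]; simp) hstep
    rw [hlen] at hrec
    exact hrec

-- ===== VERDICT (by name: the statement is the Claim_ definition above) =====
theorem helper_spec : Claim_equal_helper := by
  intro s _
  unfold Spec_helper helper helper_alt
  have h0 : CInv s.toList [] (PySem.Dict.empty, 0, 0) (PySem.Dict.empty, 0) := by
    refine ⟨0, rfl, by simp, ?_, ?_, ?_, by simp, by simp⟩
    · intro c; simp [PySem.Dict.getD_empty, occsFrom, occsIdx]
    · intro c; simp [PySem.Dict.get?_empty, occs, occsIdx]
    · simp [PySem.Dict.keys_empty, PySem.Set.ofList_eq_foldl]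
  have hmain := main_fold s s.toList [] (PySem.Dict.empty, 0, 0) (PySem.Dict.empty, 0)
    (by simp) h0
  simp only [List.length_nil, Nat.cast_zero] at hmain
  obtain ⟨i, -, -, -, -, -, hres, -⟩ := hmain
  rw [hres]; ring
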